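-- pv_equiv track=rewrite | github.com/LeetCodeStudyGroup/LeetCode | LeetCode/413.Arithmetic Slices.py | get_arithmetic
-- ===== SOURCE A (Python) =====
-- def get_arithmetic(A):
--     ary, cnt, max_cnt = [], 1, 0
--     for i in range(2, len(A)):
--         if A[i] - A[i - 1] == A[i - 1] - A[i - 2]:
--             cnt += 1
--         else:
--             if cnt > 1:
--                 ary.append(cnt)
--             max_cnt, cnt = max(max_cnt, cnt), 1
--     if cnt > 1:
--         ary.append(cnt)
--     max_cnt = max(max_cnt, cnt)
--     return ary, max_cnt
-- ===== SOURCE B (Python) =====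
-- def get_arithmetic(A):
--     # materialize consecutive differences, then scan them run by run (two pointers)
--     diffs = [y - x for x, y in zip(A, A[1:])]
--     ary = []
--     max_cnt = 1
--     n = len(diffs)
--     i = 0
--     while i < n:
--         j = i + 1
--         while j < n and diffs[j] == diffs[i]:
--             j += 1
--         L = j - i
--         if L > 1:
--             ary.append(L)
--         if L > max_cnt:
--             max_cnt = L
--         i = j
--     return ary, max_cnt
-- ===== Notes on version B (the rewrite author's own statement) =====
-- stated objective: alternative
-- what changed: A keeps a running counter over index triples A[i-2],A[i-1],A[i] and flushes it on each break; B first materializes the consecutive-difference list and then scans it run by run with two pointers, emitting each run length directly (same cost, different decomposition).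
import Mathlib
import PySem

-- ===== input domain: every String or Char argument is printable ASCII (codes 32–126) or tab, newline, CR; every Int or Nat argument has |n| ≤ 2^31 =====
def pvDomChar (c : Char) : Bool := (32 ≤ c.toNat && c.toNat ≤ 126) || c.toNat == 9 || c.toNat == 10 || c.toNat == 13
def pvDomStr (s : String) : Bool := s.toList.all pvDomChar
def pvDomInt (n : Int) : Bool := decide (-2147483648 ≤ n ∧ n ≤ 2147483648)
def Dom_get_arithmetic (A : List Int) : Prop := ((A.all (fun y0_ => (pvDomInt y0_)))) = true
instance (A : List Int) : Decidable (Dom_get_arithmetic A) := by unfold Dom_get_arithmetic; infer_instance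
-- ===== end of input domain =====

-- B materializes the consecutive-difference list and scans it run by run (two pointers),
-- instead of A's single counter pass over index triples; objective: alternative decomposition, same cost.

-- ===== PORT A =====
-- loop body of A's for-loop (state = (ary, cnt, max_cnt)); A[i] ported as pyGetD (indices 2 ≤ i < len(A) are always in range, so the default is never used)
def stepA (A : List Int) (st : List Int × Int × Int) (i : Int) : List Int × Int × Int :=
  if PySem.List.pyGetD A i 0 - PySem.List.pyGetD A (i - 1) 0
      = PySem.List.pyGetD A (i - 1) 0 - PySem.List.pyGetD A (i - 2) 0
  then (st.1, st.2.1 + 1, st.2.2)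
  else ((if st.2.1 > 1 then st.1 ++ [st.2.1] else st.1), 1, max st.2.2 st.2.1)

def get_arithmetic (A : List Int) : List Int × Int :=
  let st := (PySem.List.pyRange 2 (PySem.List.len A)).foldl (stepA A) ([], 1, 0)
  ((if st.2.1 > 1 then st.1 ++ [st.2.1] else st.1), max st.2.2 st.2.1)

-- ===== PORT B =====
-- B's outer while-loop: peel one maximal run of equal diffs per step (the inner while is the takeWhile/dropWhile scan)
def runScan : List Int → List Int → Int → List Int × Int
  | [], ary, maxc => (ary, maxc)
  | d :: rest, ary, maxc =>
      let L : Int := ((rest.takeWhile (· == d)).length : Int) + 1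
      runScan (rest.dropWhile (· == d)) (if L > 1 then ary ++ [L] else ary) (max maxc L)
termination_by l _ _ => l.length
decreasing_by
  exact Nat.lt_succ_of_le (List.length_dropWhile_le _ _)

def get_arithmetic_alt (A : List Int) : List Int × Int :=
  runScan (List.zipWith (fun x y => y - x) A (A.drop 1)) [] 1

-- ===== PRECONDITION & SPEC =====
def Spec_get_arithmetic (A : List Int) (out : List Int × Int) : Prop := out = get_arithmetic_alt A
instance (A : List Int) (out : List Int × Int) : Decidable (Spec_get_arithmetic A out) := by unfold Spec_get_arithmetic; infer_instance

-- ===== CLAIM (what is proved, stated in full; the proofs are below) =====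
def Claim_equal_get_arithmetic : Prop := ∀ (A : List Int), Dom_get_arithmetic A → Spec_get_arithmetic A (get_arithmetic A)

-- ===== LEMMAS AND PROOFS =====

-- the consecutive-difference list
def dsOf (A : List Int) : List Int := List.zipWith (fun x y => y - x) A (A.drop 1)

-- A's loop rephrased over the diff list, carrying the previous diff
def aLoop : Int → List Int × Int × Int → List Int → List Int × Int × Int
  | _, st, [] => st
  | d, st, e :: rest =>
      aLoop e (if e = d then (st.1, st.2.1 + 1, st.2.2)
               else ((if st.2.1 > 1 then st.1 ++ [st.2.1] else st.1), 1, max st.2.2 st.2.1)) rest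

-- A's epilogue
def finA (st : List Int × Int × Int) : List Int × Int :=
  ((if st.2.1 > 1 then st.1 ++ [st.2.1] else st.1), max st.2.2 st.2.1)

lemma length_dsOf (A : List Int) : (dsOf A).length = A.length - 1 := by
  simp [dsOf]

lemma dsOf_getD (A : List Int) (j : Nat) (h : j + 1 < A.length) :
    (dsOf A).getD j 0 = A.getD (j + 1) 0 - A.getD j 0 := by
  have hj : j < (dsOf A).length := by rw [length_dsOf]; omega
  have h1 : j < A.length := by omega
  have h2 : j < (A.drop 1).length := by simp; omega
  rw [List.getD_eq_getElem _ _ hj, List.getD_eq_getElem _ _ h, List.getD_eq_getElem _ _ h1]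
  simp [dsOf, List.getElem_zipWith]

lemma idx (A : List Int) : ∀ (k i : Nat), i + 2 + k = A.length → ∀ (st : List Int × Int × Int),
    (PySem.List.pyRange ((i : Int) + 2) (PySem.List.len A)).foldl (stepA A) st
      = aLoop ((dsOf A).getD i 0) st ((dsOf A).drop (i + 1)) := by
  intro k
  induction k with
  | zero =>
      intro i hik st
      have hr : PySem.List.pyRange ((i : Int) + 2) (PySem.List.len A) = [] := by
        simp [PySem.List.pyRange, PySem.List.len]; omega
      have hd : (dsOf A).drop (i + 1) = [] := by
        apply List.drop_eq_nil_of_le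
        rw [length_dsOf]; omega
      rw [hr, hd]
      rfl
  | succ k ih =>
      intro i hik st
      have hlt : ((i : Int) + 2) < PySem.List.len A := by
        simp [PySem.List.len]; omega
      rw [PySem.List.pyRange_one_cons hlt]
      rw [List.foldl_cons]
      have hcast1 : ((i : Int) + 2) - 1 = ((i + 1 : Nat) : Int) := by push_cast; ring
      have hcast2 : ((i : Int) + 2) - 2 = ((i : Nat) : Int) := by omega
      have hcast0 : ((i : Int) + 2) = ((i + 2 : Nat) : Int) := by push_cast; ring
      have hstep : stepA A st ((i : Int) + 2)
          = (if (dsOf A).getD (i+1) 0 = (dsOf A).getD i 0 then (st.1, st.2.1 + 1, st.2.2)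
             else ((if st.2.1 > 1 then st.1 ++ [st.2.1] else st.1), 1, max st.2.2 st.2.1)) := by
        rw [stepA, hcast1, hcast2, hcast0]
        rw [PySem.List.pyGetD_natCast, PySem.List.pyGetD_natCast, PySem.List.pyGetD_natCast]
        rw [dsOf_getD A (i+1) (by omega), dsOf_getD A i (by omega)]
      have hds : i + 1 < (dsOf A).length := by rw [length_dsOf]; omega
      rw [List.drop_eq_getElem_cons hds]
      rw [aLoop]
      rw [← List.getD_eq_getElem (dsOf A) 0 hds]
      have hih := ih (i + 1) (by omega) (stepA A st ((i : Int) + 2))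
      have hcast3 : ((i + 1 : Nat) : Int) + 2 = ((i : Int) + 2) + 1 := by push_cast; ring
      rw [hcast3] at hih
      rw [hih, hstep]

-- the core correspondence: A's flush-on-break loop equals B's run scan
lemma main : ∀ (N : Nat) (t : List Int), t.length ≤ N → ∀ (d : Int) (ary : List Int) (cnt maxc : Int),
    finA (aLoop d (ary, cnt, maxc) t)
      = runScan (t.dropWhile (· == d))
          (if cnt + ((t.takeWhile (· == d)).length : Int) > 1
             then ary ++ [cnt + ((t.takeWhile (· == d)).length : Int)] else ary)
          (max maxc (cnt + ((t.takeWhile (· == d)).length : Int))) := by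
  intro N
  induction N with
  | zero =>
      intro t ht d ary cnt maxc
      have ht0 : t = [] := List.eq_nil_of_length_eq_zero (Nat.le_zero.mp ht)
      subst ht0
      simp [aLoop, finA, runScan]
  | succ N ih =>
      intro t ht d ary cnt maxc
      match t with
      | [] => simp [aLoop, finA, runScan]
      | x :: t' =>
          by_cases hx : x = d
          · subst hx
            rw [List.takeWhile_cons_of_pos (by simp), List.dropWhile_cons_of_pos (by simp)]
            rw [aLoop, if_pos rfl]
            have := ih t' (by simpa using Nat.lt_succ_iff.mp (Nat.lt_of_lt_of_le (by simp) ht)) x ary (cnt + 1) maxc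
            rw [this]
            have harith : cnt + 1 + ((t'.takeWhile (· == x)).length : Int)
                = cnt + (((t'.takeWhile (· == x)).length : Int) + 1) := by ring
            rw [harith]
            norm_cast
          · rw [List.takeWhile_cons_of_neg (by simp [hx]), List.dropWhile_cons_of_neg (by simp [hx])]
            rw [aLoop, if_neg hx]
            have := ih t' (by simpa using Nat.lt_succ_iff.mp (Nat.lt_of_lt_of_le (by simp) ht)) x
              (if cnt > 1 then ary ++ [cnt] else ary) 1 (max maxc cnt)
            rw [this, runScan]
            have h1 : (1 : Int) + ((t'.takeWhile (· == x)).length : Int)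
                = ((t'.takeWhile (· == x)).length : Int) + 1 := by ring
            rw [h1]
            simp

theorem get_arithmetic_eq (A : List Int) : get_arithmetic A = get_arithmetic_alt A := by
  unfold get_arithmetic get_arithmetic_alt
  rw [show (List.zipWith (fun x y => y - x) A (A.drop 1)) = dsOf A from rfl]
  rcases Nat.lt_or_ge A.length 2 with h2 | h2
  · have hr : PySem.List.pyRange 2 (PySem.List.len A) = [] := by
      simp [PySem.List.pyRange, PySem.List.len]; omega
    have hds : dsOf A = [] := by
      apply List.eq_nil_of_length_eq_zero
      rw [length_dsOf]; omega
    rw [hr, hds]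
    simp [runScan]
  · have h0 : (0 : Nat) + 2 + (A.length - 2) = A.length := by omega
    have hidx := idx A (A.length - 2) 0 h0 ([], 1, 0)
    simp only [Nat.cast_zero, zero_add] at hidx
    rw [hidx]
    have hds0 : 0 < (dsOf A).length := by rw [length_dsOf]; omega
    have hmain := main ((dsOf A).drop 1).length ((dsOf A).drop 1) le_rfl
      ((dsOf A).getD 0 0) [] 1 0
    rw [show finA (aLoop ((dsOf A).getD 0 0) ([], 1, 0) ((dsOf A).drop 1))
          = ((if (aLoop ((dsOf A).getD 0 0) ([], 1, 0) ((dsOf A).drop 1)).2.1 > 1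
               then (aLoop ((dsOf A).getD 0 0) ([], 1, 0) ((dsOf A).drop 1)).1
                 ++ [(aLoop ((dsOf A).getD 0 0) ([], 1, 0) ((dsOf A).drop 1)).2.1]
               else (aLoop ((dsOf A).getD 0 0) ([], 1, 0) ((dsOf A).drop 1)).1),
             max (aLoop ((dsOf A).getD 0 0) ([], 1, 0) ((dsOf A).drop 1)).2.2
               (aLoop ((dsOf A).getD 0 0) ([], 1, 0) ((dsOf A).drop 1)).2.1) from rfl] at hmain
    rw [hmain]
    have hcons : dsOf A = (dsOf A).getD 0 0 :: (dsOf A).drop 1 := by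
      rw [List.getD_eq_getElem _ _ hds0]
      conv_lhs => rw [← List.drop_zero (l := dsOf A)]
      exact List.drop_eq_getElem_cons hds0
    conv_rhs => rw [hcons, runScan]
    have hc : (1 : Int) + (((((dsOf A).drop 1)).takeWhile (· == (dsOf A).getD 0 0)).length : Int)
        = ((((dsOf A).drop 1).takeWhile (· == (dsOf A).getD 0 0)).length : Int) + 1 := by ring
    rw [hc]
    rw [show max (0 : Int) (((((dsOf A).drop 1).takeWhile (· == (dsOf A).getD 0 0)).length : Int) + 1)
          = max (1 : Int) (((((dsOf A).drop 1).takeWhile (· == (dsOf A).getD 0 0)).length : Int) + 1) by omega]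

-- ===== VERDICT (by name: the statement is the Claim_ definition above) =====
theorem get_arithmetic_spec : Claim_equal_get_arithmetic := by
  intro A _
  unfold Spec_get_arithmetic
  exact get_arithmetic_eq A
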